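-- pv_equiv track=rewrite | github.com/mortyc126-debug/SHA | p36_b2_conditional.py | compute_f17_f18
-- ===== SOURCE A (Python) =====
-- MASK = 0xFFFFFFFF
--
-- def rotr(x, n): return ((x >> n) | (x << (32-n))) & MASK
--
-- def sig0(x):  return rotr(x,7)  ^ rotr(x,18) ^ (x>>3)
--
-- def sig1(x):  return rotr(x,17) ^ rotr(x,19) ^ (x>>10)
--
-- def Sig0(x):  return rotr(x,2)  ^ rotr(x,13) ^ rotr(x,22)
--
-- def Sig1(x):  return rotr(x,6)  ^ rotr(x,11) ^ rotr(x,25)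
--
-- def Ch(e,f,g):  return ((e&f) ^ (~e&g)) & MASK
--
-- def Maj(a,b,c): return (a&b) ^ (a&c) ^ (b&c)
--
-- K = [0x428a2f98,0x71374491,0xb5c0fbcf,0xe9b5dba5,0x3956c25b,0x59f111f1,0x923f82a4,0xab1c5ed5,
--      0xd807aa98,0x12835b01,0x243185be,0x550c7dc3,0x72be5d74,0x80deb1fe,0x9bdc06a7,0xc19bf174,
--      0xe49b69c1,0xefbe4786,0x0fc19dc6,0x240ca1cc,0x2de92c6f,0x4a7484aa,0x5cb0a9dc,0x76f988da,
--      0x983e5152,0xa831c66d,0xb00327c8,0xbf597fc7,0xc6e00bf3,0xd5a79147,0x06ca6351,0x14292967,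
--      0x27b70a85,0x2e1b2138,0x4d2c6dfc,0x53380d13,0x650a7354,0x766a0abb,0x81c2c92e,0x92722c85,
--      0xa2bfe8a1,0xa81a664b,0xc24b8b70,0xc76c51a3,0xd192e819,0xd6990624,0xf40e3585,0x106aa070,
--      0x19a4c116,0x1e376c08,0x2748774c,0x34b0bcb5,0x391c0cb3,0x4ed8aa4a,0x5b9cca4f,0x682e6ff3,
--      0x748f82ee,0x78a5636f,0x84c87814,0x8cc70208,0x90befffa,0xa4506ceb,0xbef9a3f7,0xc67178f2]
--
-- IV = [0x6a09e667,0xbb67ae85,0x3c6ef372,0xa54ff53a,0x510e527f,0x9b05688c,0x1f83d9ab,0x5be0cd19]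
--
-- def make_schedule(W16):
--     W = list(W16) + [0]*48
--     for i in range(16, 64):
--         W[i] = (sig1(W[i-2]) + W[i-7] + sig0(W[i-15]) + W[i-16]) & MASK
--     return W
--
-- def sha_rounds(W, R):
--     a,b,c,d,e,f,g,h = IV
--     states = [[a,b,c,d,e,f,g,h]]
--     for r in range(R):
--         T1 = (h + Sig1(e) + Ch(e,f,g) + K[r] + W[r]) & MASK
--         T2 = (Sig0(a) + Maj(a,b,c)) & MASK
--         h=g; g=f; f=e; e=(d+T1)&MASK
--         d=c; c=b; b=a; a=(T1+T2)&MASK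
--         states.append([a,b,c,d,e,f,g,h])
--     return states
--
-- def compute_f17_f18(W0, W1, DW0=1):
--     Wn = [W0, W1] + [0]*14
--     DWs = [0]*16; DWs[0] = DW0
--     Wf_tmp = [(Wn[i]+DWs[i])&MASK for i in range(16)]
--     sn3 = sha_rounds(make_schedule(Wn), 3)
--     sf3 = sha_rounds(make_schedule(Wf_tmp), 3)
--     DWs[2] = (-(sf3[3][4] - sn3[3][4])) & MASK
--     for step in range(13):
--         wi = step+3; dt = step+4
--         Wfc = [(Wn[i]+DWs[i])&MASK for i in range(16)]
--         sn = sha_rounds(make_schedule(Wn), dt)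
--         sf = sha_rounds(make_schedule(Wfc), dt)
--         DWs[wi] = (-(sf[dt][4] - sn[dt][4])) & MASK
--     Wf = [(Wn[i]+DWs[i])&MASK for i in range(16)]
--     Wn_s = make_schedule(Wn); Wf_s = make_schedule(Wf)
--     sn = sha_rounds(Wn_s, 15); sf = sha_rounds(Wf_s, 15)
--     da13 = (sf[13][0] - sn[13][0]) & MASK
--     da14 = (sf[14][0] - sn[14][0]) & MASK
--     dw16 = (Wf_s[16] - Wn_s[16]) & MASK
--     dw17 = (Wf_s[17] - Wn_s[17]) & MASK
--     return (da13+dw16)&MASK, (da14+dw17)&MASK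
-- ===== SOURCE B (Python) =====
-- MASK = 0xFFFFFFFF
--
-- def rotr(x, n): return ((x >> n) | (x << (32-n))) & MASK
--
-- def sig0(x):  return rotr(x,7)  ^ rotr(x,18) ^ (x>>3)
--
-- def sig1(x):  return rotr(x,17) ^ rotr(x,19) ^ (x>>10)
--
-- def Sig0(x):  return rotr(x,2)  ^ rotr(x,13) ^ rotr(x,22)
--
-- def Sig1(x):  return rotr(x,6)  ^ rotr(x,11) ^ rotr(x,25)
--
-- def Ch(e,f,g):  return ((e&f) ^ (~e&g)) & MASK
--
-- def Maj(a,b,c): return (a&b) ^ (a&c) ^ (b&c)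
--
-- K = [0x428a2f98,0x71374491,0xb5c0fbcf,0xe9b5dba5,0x3956c25b,0x59f111f1,0x923f82a4,0xab1c5ed5,
--      0xd807aa98,0x12835b01,0x243185be,0x550c7dc3,0x72be5d74,0x80deb1fe,0x9bdc06a7,0xc19bf174,
--      0xe49b69c1,0xefbe4786,0x0fc19dc6,0x240ca1cc,0x2de92c6f,0x4a7484aa,0x5cb0a9dc,0x76f988da,
--      0x983e5152,0xa831c66d,0xb00327c8,0xbf597fc7,0xc6e00bf3,0xd5a79147,0x06ca6351,0x14292967,
--      0x27b70a85,0x2e1b2138,0x4d2c6dfc,0x53380d13,0x650a7354,0x766a0abb,0x81c2c92e,0x92722c85,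
--      0xa2bfe8a1,0xa81a664b,0xc24b8b70,0xc76c51a3,0xd192e819,0xd6990624,0xf40e3585,0x106aa070,
--      0x19a4c116,0x1e376c08,0x2748774c,0x34b0bcb5,0x391c0cb3,0x4ed8aa4a,0x5b9cca4f,0x682e6ff3,
--      0x748f82ee,0x78a5636f,0x84c87814,0x8cc70208,0x90befffa,0xa4506ceb,0xbef9a3f7,0xc67178f2]
--
-- IV = [0x6a09e667,0xbb67ae85,0x3c6ef372,0xa54ff53a,0x510e527f,0x9b05688c,0x1f83d9ab,0x5be0cd19]
--
-- def sha_step(s, k, w):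
--     a,b,c,d,e,f,g,h = s
--     T1 = (h + Sig1(e) + Ch(e,f,g) + k + w) & MASK
--     T2 = (Sig0(a) + Maj(a,b,c)) & MASK
--     return ((T1+T2)&MASK, a, b, c, (d+T1)&MASK, e, f, g)
--
-- def normal_pass(Wn):
--     # one 16-round pass on the raw words, recording e and a after each round
--     s = tuple(IV)
--     e_n = [s[4]]; a_n = [s[0]]
--     for r in range(16):
--         s = sha_step(s, K[r], Wn[r])
--         e_n.append(s[4]); a_n.append(s[0])
--     return e_n, a_n
--
-- def derive_pass(Wn, e_n, DW0):
--     # one perturbed 16-round pass, deriving each correction online: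
--     # since round r injects its word additively into e mod 2^32, the correction
--     # that realigns e after round r+1 is read off a single trial step
--     DWs = [DW0, 0]
--     t = tuple(IV)
--     a_f = [t[0]]
--     for r in range(16):
--         if r >= 2:
--             trial = sha_step(t, K[r], Wn[r] & MASK)
--             DWs.append((e_n[r+1] - trial[4]) & MASK)
--         t = sha_step(t, K[r], (Wn[r] + DWs[r]) & MASK)
--         a_f.append(t[0])
--     return DWs, a_f
--
-- def w16w17(W):
--     # the only expanded-schedule words the result uses, in closed form
--     w16 = (sig1(W[14]) + W[9] + sig0(W[1]) + W[0]) & MASK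
--     w17 = (sig1(W[15]) + W[10] + sig0(W[2]) + W[1]) & MASK
--     return w16, w17
--
-- def compute_f17_f18(W0, W1, DW0=1):
--     Wn = [W0, W1] + [0]*14
--     e_n, a_n = normal_pass(Wn)
--     DWs, a_f = derive_pass(Wn, e_n, DW0)
--     Wf = [(Wn[i] + DWs[i]) & MASK for i in range(16)]
--     n16, n17 = w16w17(Wn)
--     f16, f17 = w16w17(Wf)
--     da13 = (a_f[13] - a_n[13]) & MASK
--     da14 = (a_f[14] - a_n[14]) & MASK
--     dw16 = (f16 - n16) & MASK
--     dw17 = (f17 - n17) & MASK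
--     return (da13+dw16)&MASK, (da14+dw17)&MASK
-- ===== Notes on version B (the rewrite author's own statement) =====
-- stated objective: faster
-- what changed: B replaces A's ~30 from-scratch schedule expansions and compression reruns by exactly two 16-round passes: one normal pass recording e/a per round, and one perturbed pass that derives each correction DWs[wi] online from a single trial step of the incrementally maintained perturbed state (valid because round wi injects its word additively into e mod 2^32), plus closed-form computation of the only two expanded-schedule words (W16, W17) the result uses instead of any 64-word schedule expansion.
import Mathlib
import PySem

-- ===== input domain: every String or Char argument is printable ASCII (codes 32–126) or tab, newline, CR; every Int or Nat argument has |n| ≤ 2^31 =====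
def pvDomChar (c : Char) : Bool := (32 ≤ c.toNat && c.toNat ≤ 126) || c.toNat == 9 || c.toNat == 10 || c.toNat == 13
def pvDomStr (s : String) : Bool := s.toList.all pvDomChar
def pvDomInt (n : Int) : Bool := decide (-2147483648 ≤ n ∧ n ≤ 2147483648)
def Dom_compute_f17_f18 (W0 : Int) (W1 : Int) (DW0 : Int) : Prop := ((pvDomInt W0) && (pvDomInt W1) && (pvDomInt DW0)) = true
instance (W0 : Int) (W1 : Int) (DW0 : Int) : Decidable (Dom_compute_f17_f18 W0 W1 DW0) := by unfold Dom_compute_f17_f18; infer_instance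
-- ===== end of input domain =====

-- B replaces A's repeated from-scratch schedule expansions and compression reruns by two
-- 16-round passes (corrections derived online from a trial step of the maintained
-- perturbed state) and computes the only two expanded-schedule words used (W16, W17)
-- in closed form.

-- ===== PORT A =====
-- shared module context
def pMASK : Int := 0xFFFFFFFF

def pRotr (x : Int) (n : Nat) : Int :=
  PySem.Int.band (PySem.Int.bor (x >>> n) (x <<< (32 - n))) pMASK

def pSig0s (x : Int) : Int := PySem.Int.bxor (PySem.Int.bxor (pRotr x 7) (pRotr x 18)) (x >>> 3)
def pSig1s (x : Int) : Int := PySem.Int.bxor (PySem.Int.bxor (pRotr x 17) (pRotr x 19)) (x >>> 10)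
def pSig0B (x : Int) : Int := PySem.Int.bxor (PySem.Int.bxor (pRotr x 2) (pRotr x 13)) (pRotr x 22)
def pSig1B (x : Int) : Int := PySem.Int.bxor (PySem.Int.bxor (pRotr x 6) (pRotr x 11)) (pRotr x 25)
def pCh (e f g : Int) : Int :=
  PySem.Int.band (PySem.Int.bxor (PySem.Int.band e f) (PySem.Int.band (Int.not e) g)) pMASK
def pMaj (a b c : Int) : Int :=
  PySem.Int.bxor (PySem.Int.bxor (PySem.Int.band a b) (PySem.Int.band a c)) (PySem.Int.band b c)

def pK : List Int :=
  [0x428a2f98,0x71374491,0xb5c0fbcf,0xe9b5dba5,0x3956c25b,0x59f111f1,0x923f82a4,0xab1c5ed5,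
   0xd807aa98,0x12835b01,0x243185be,0x550c7dc3,0x72be5d74,0x80deb1fe,0x9bdc06a7,0xc19bf174,
   0xe49b69c1,0xefbe4786,0x0fc19dc6,0x240ca1cc,0x2de92c6f,0x4a7484aa,0x5cb0a9dc,0x76f988da,
   0x983e5152,0xa831c66d,0xb00327c8,0xbf597fc7,0xc6e00bf3,0xd5a79147,0x06ca6351,0x14292967,
   0x27b70a85,0x2e1b2138,0x4d2c6dfc,0x53380d13,0x650a7354,0x766a0abb,0x81c2c92e,0x92722c85,
   0xa2bfe8a1,0xa81a664b,0xc24b8b70,0xc76c51a3,0xd192e819,0xd6990624,0xf40e3585,0x106aa070,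
   0x19a4c116,0x1e376c08,0x2748774c,0x34b0bcb5,0x391c0cb3,0x4ed8aa4a,0x5b9cca4f,0x682e6ff3,
   0x748f82ee,0x78a5636f,0x84c87814,0x8cc70208,0x90befffa,0xa4506ceb,0xbef9a3f7,0xc67178f2]

def pIV : List Int :=
  [0x6a09e667,0xbb67ae85,0x3c6ef372,0xa54ff53a,0x510e527f,0x9b05688c,0x1f83d9ab,0x5be0cd19]

abbrev PSt := Int × Int × Int × Int × Int × Int × Int × Int

def pIVt : PSt :=
  (0x6a09e667, 0xbb67ae85, 0x3c6ef372, 0xa54ff53a, 0x510e527f, 0x9b05688c, 0x1f83d9ab, 0x5be0cd19)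

-- A: preallocate 64 slots, then set W[i] for i = 16..63
def make_scheduleA (W16 : List Int) : List Int :=
  (List.range' 16 48).foldl
    (fun W i =>
      W.set i (PySem.Int.band
        (pSig1s (W.getD (i-2) 0) + W.getD (i-7) 0 + pSig0s (W.getD (i-15) 0) + W.getD (i-16) 0) pMASK))
    (W16 ++ List.replicate 48 0)

-- A: full list of round states, rounds written inline as in the Python
def sha_roundsA (W : List Int) (R : Nat) : List (List Int) :=
  ((List.range R).foldl
    (fun (p : PSt × List (List Int)) r =>
      match p with
      | ((a,b,c,d,e,f,g,h), states) =>
        let T1 := PySem.Int.band (h + pSig1B e + pCh e f g + pK.getD r 0 + W.getD r 0) pMASK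
        let T2 := PySem.Int.band (pSig0B a + pMaj a b c) pMASK
        let e' := PySem.Int.band (d + T1) pMASK
        let a' := PySem.Int.band (T1 + T2) pMASK
        ((a', a, b, c, e', e, f, g), states ++ [[a', a, b, c, e', e, f, g]]))
    (pIVt, [pIV])).2

def compute_f17_f18 (W0 : Int) (W1 : Int) (DW0 : Int) : Int × Int :=
  let Wn : List Int := [W0, W1] ++ List.replicate 14 0
  let DWs0 : List Int := (List.replicate 16 0).set 0 DW0
  let Wf_tmp := (List.range 16).map (fun i => PySem.Int.band (Wn.getD i 0 + DWs0.getD i 0) pMASK)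
  let sn3 := sha_roundsA (make_scheduleA Wn) 3
  let sf3 := sha_roundsA (make_scheduleA Wf_tmp) 3
  let DWs1 := DWs0.set 2 (PySem.Int.band (-(((sf3.getD 3 []).getD 4 0) - ((sn3.getD 3 []).getD 4 0))) pMASK)
  let DWs := (List.range 13).foldl
    (fun DWs step =>
      let wi := step + 3
      let dt := step + 4
      let Wfc := (List.range 16).map (fun i => PySem.Int.band (Wn.getD i 0 + DWs.getD i 0) pMASK)
      let sn := sha_roundsA (make_scheduleA Wn) dt
      let sf := sha_roundsA (make_scheduleA Wfc) dt
      DWs.set wi (PySem.Int.band (-(((sf.getD dt []).getD 4 0) - ((sn.getD dt []).getD 4 0))) pMASK))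
    DWs1
  let Wf := (List.range 16).map (fun i => PySem.Int.band (Wn.getD i 0 + DWs.getD i 0) pMASK)
  let Wn_s := make_scheduleA Wn
  let Wf_s := make_scheduleA Wf
  let sn := sha_roundsA Wn_s 15
  let sf := sha_roundsA Wf_s 15
  let da13 := PySem.Int.band ((sf.getD 13 []).getD 0 0 - (sn.getD 13 []).getD 0 0) pMASK
  let da14 := PySem.Int.band ((sf.getD 14 []).getD 0 0 - (sn.getD 14 []).getD 0 0) pMASK
  let dw16 := PySem.Int.band (Wf_s.getD 16 0 - Wn_s.getD 16 0) pMASK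
  let dw17 := PySem.Int.band (Wf_s.getD 17 0 - Wn_s.getD 17 0) pMASK
  (PySem.Int.band (da13 + dw16) pMASK, PySem.Int.band (da14 + dw17) pMASK)

-- ===== PORT B =====
def sha_stepB (s : PSt) (k : Int) (w : Int) : PSt :=
  match s with
  | (a,b,c,d,e,f,g,h) =>
    let T1 := PySem.Int.band (h + pSig1B e + pCh e f g + k + w) pMASK
    let T2 := PySem.Int.band (pSig0B a + pMaj a b c) pMASK
    (PySem.Int.band (T1 + T2) pMASK, a, b, c, PySem.Int.band (d + T1) pMASK, e, f, g)

-- one 16-round pass on the raw words, recording e and a after each round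
def normal_passB (Wn : List Int) : List Int × List Int :=
  let p := (List.range 16).foldl
    (fun (p : PSt × List Int × List Int) r =>
      let s' := sha_stepB p.1 (pK.getD r 0) (Wn.getD r 0)
      (s', p.2.1 ++ [s'.2.2.2.2.1], p.2.2 ++ [s'.1]))
    (pIVt, [pIVt.2.2.2.2.1], [pIVt.1])
  (p.2.1, p.2.2)

-- body of the perturbed pass: derive the correction from a single trial step, then step
def dstepB (Wn : List Int) (E : List Int) (q : List Int × PSt × List Int) (r : Nat) :
    List Int × PSt × List Int :=
  let DWs' := if 2 ≤ r then
      let trial := sha_stepB q.2.1 (pK.getD r 0) (PySem.Int.band (Wn.getD r 0) pMASK)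
      q.1 ++ [PySem.Int.band (E.getD (r+1) 0 - trial.2.2.2.2.1) pMASK]
    else q.1
  let t' := sha_stepB q.2.1 (pK.getD r 0) (PySem.Int.band (Wn.getD r 0 + DWs'.getD r 0) pMASK)
  (DWs', t', q.2.2 ++ [t'.1])

def derive_passB (Wn : List Int) (E : List Int) (DW0 : Int) : List Int × List Int :=
  let q := (List.range 16).foldl (dstepB Wn E) ([DW0, 0], pIVt, [pIVt.1])
  (q.1, q.2.2)

-- the only expanded-schedule words the result uses, in closed form
def w16w17B (W : List Int) : Int × Int :=
  (PySem.Int.band (pSig1s (W.getD 14 0) + W.getD 9 0 + pSig0s (W.getD 1 0) + W.getD 0 0) pMASK,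
   PySem.Int.band (pSig1s (W.getD 15 0) + W.getD 10 0 + pSig0s (W.getD 2 0) + W.getD 1 0) pMASK)

def compute_f17_f18_alt (W0 : Int) (W1 : Int) (DW0 : Int) : Int × Int :=
  let Wn : List Int := [W0, W1] ++ List.replicate 14 0
  let en_an := normal_passB Wn
  let e_n := en_an.1
  let a_n := en_an.2
  let dws_af := derive_passB Wn e_n DW0
  let DWs := dws_af.1
  let a_f := dws_af.2
  let Wf := (List.range 16).map (fun i => PySem.Int.band (Wn.getD i 0 + DWs.getD i 0) pMASK)
  let n1617 := w16w17B Wn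
  let f1617 := w16w17B Wf
  let da13 := PySem.Int.band (a_f.getD 13 0 - a_n.getD 13 0) pMASK
  let da14 := PySem.Int.band (a_f.getD 14 0 - a_n.getD 14 0) pMASK
  let dw16 := PySem.Int.band (f1617.1 - n1617.1) pMASK
  let dw17 := PySem.Int.band (f1617.2 - n1617.2) pMASK
  (PySem.Int.band (da13 + dw16) pMASK, PySem.Int.band (da14 + dw17) pMASK)

-- ===== PRECONDITION & SPEC =====
def Spec_compute_f17_f18 (W0 : Int) (W1 : Int) (DW0 : Int) (out : Int × Int) : Prop := out = compute_f17_f18_alt W0 W1 DW0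
instance (W0 : Int) (W1 : Int) (DW0 : Int) (out : Int × Int) : Decidable (Spec_compute_f17_f18 W0 W1 DW0 out) := by unfold Spec_compute_f17_f18; infer_instance

-- ===== CLAIM (what is proved, stated in full; the proofs are below) =====
def Claim_equal_compute_f17_f18 : Prop := ∀ (W0 : Int) (W1 : Int) (DW0 : Int), Dom_compute_f17_f18 W0 W1 DW0 → Spec_compute_f17_f18 W0 W1 DW0 (compute_f17_f18 W0 W1 DW0)

-- ===== LEMMAS AND PROOFS =====

def stList (s : PSt) : List Int :=
  [s.1, s.2.1, s.2.2.1, s.2.2.2.1, s.2.2.2.2.1, s.2.2.2.2.2.1, s.2.2.2.2.2.2.1, s.2.2.2.2.2.2.2]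

def iterSt (W : List Int) : Nat → PSt
  | 0 => pIVt
  | n+1 => sha_stepB (iterSt W n) (pK.getD n 0) (W.getD n 0)

theorem getD_map_range {α : Type} (f : Nat → α) (d : α) {m n : Nat} (h : n < m) :
    ((List.range m).map f).getD n d = f n := by
  simp [List.getD_eq_getElem?_getD, List.getElem?_map, List.getElem?_range h]

theorem prefix_getD {α : Type} {P L : List α} (h : P <+: L) {i : Nat} (hi : i < P.length) (d : α) :
    L.getD i d = P.getD i d := by
  obtain ⟨T, rfl⟩ := h
  exact List.getD_append P T d i hi

theorem iterSt_congr (W W' : List Int) : ∀ n : Nat, (∀ r, r < n → W.getD r 0 = W'.getD r 0) →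
    iterSt W n = iterSt W' n
  | 0 => fun _ => rfl
  | (n+1) => fun h => by
      rw [iterSt, iterSt, iterSt_congr W W' n (fun r hr => h r (by omega)), h n (by omega)]

theorem foldA_char (W : List Int) : ∀ R : Nat,
    (List.range R).foldl
      (fun (p : PSt × List (List Int)) r =>
        match p with
        | ((a,b,c,d,e,f,g,h), states) =>
          let T1 := PySem.Int.band (h + pSig1B e + pCh e f g + pK.getD r 0 + W.getD r 0) pMASK
          let T2 := PySem.Int.band (pSig0B a + pMaj a b c) pMASK
          let e' := PySem.Int.band (d + T1) pMASK
          let a' := PySem.Int.band (T1 + T2) pMASK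
          ((a', a, b, c, e', e, f, g), states ++ [[a', a, b, c, e', e, f, g]]))
      (pIVt, [pIV])
    = (iterSt W R, (List.range (R+1)).map (fun r => stList (iterSt W r)))
  | 0 => rfl
  | (R+1) => by
      rw [List.range_succ, List.foldl_append, foldA_char W R]
      rw [show List.range (R+1+1) = List.range (R+1) ++ [R+1] from List.range_succ]
      rcases hE : iterSt W R with ⟨a,b,c,d,e,f,g,h⟩
      simp [iterSt, hE, sha_stepB, stList]

theorem shaA_getD (W : List Int) (R dt : Nat) (h : dt < R+1) :
    (sha_roundsA W R).getD dt [] = stList (iterSt W dt) := by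
  rw [sha_roundsA, foldA_char]
  exact getD_map_range _ _ h

theorem stget4 (s : PSt) : (stList s).getD 4 0 = s.2.2.2.2.1 := rfl
theorem stget0 (s : PSt) : (stList s).getD 0 0 = s.1 := rfl

theorem set_append_cons {α : Type} (P rest : List α) (a v : α) :
    (P ++ a :: rest).set P.length v = P ++ v :: rest := by
  induction P with
  | nil => rfl
  | cons x xs ih => simp [ih]

-- append-based schedule expansion (proof-side reference)
def schedApp (W16 : List Int) (k : Nat) : List Int :=
  (List.range' 16 k).foldl
    (fun W i => W ++ [PySem.Int.band
      (pSig1s (W.getD (i-2) 0) + W.getD (i-7) 0 + pSig0s (W.getD (i-15) 0) + W.getD (i-16) 0) pMASK])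
    W16

theorem sched_inv (W16 : List Int) (h : W16.length = 16) : ∀ k : Nat, k ≤ 48 →
    ((schedApp W16 k).length = 16 + k)
    ∧ ((List.range' 16 k).foldl
       (fun W i => W.set i (PySem.Int.band
         (pSig1s (W.getD (i-2) 0) + W.getD (i-7) 0 + pSig0s (W.getD (i-15) 0) + W.getD (i-16) 0) pMASK))
       (W16 ++ List.replicate 48 0)
      = schedApp W16 k ++ List.replicate (48-k) 0) := by
  intro k
  induction k with
  | zero => intro _; simpa [schedApp] using h
  | succ k ih =>
      intro hk
      obtain ⟨hlen, heq⟩ := ih (by omega)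
      unfold schedApp at *
      rw [List.range'_concat, List.foldl_append, List.foldl_append]
      set P := (List.range' 16 k).foldl
       (fun W i => W ++ [PySem.Int.band
         (pSig1s (W.getD (i-2) 0) + W.getD (i-7) 0 + pSig0s (W.getD (i-15) 0) + W.getD (i-16) 0) pMASK])
       W16 with hP
      simp only [List.foldl_cons, List.foldl_nil, heq]
      have h2 : (16 + 1*k - 2) < P.length := by omega
      have h7 : (16 + 1*k - 7) < P.length := by omega
      have h15 : (16 + 1*k - 15) < P.length := by omega
      have h16 : (16 + 1*k - 16) < P.length := by omega
      rw [List.getD_append _ _ _ _ h2, List.getD_append _ _ _ _ h7,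
          List.getD_append _ _ _ _ h15, List.getD_append _ _ _ _ h16]
      constructor
      · simp [hlen]; omega
      · rw [show (48 - k) = (47 - k) + 1 from by omega, List.replicate_succ]
        rw [show (16 + 1*k) = P.length from by omega]
        rw [set_append_cons]
        rw [show (47 - k) = 48 - (k+1) from by omega]
        simp

theorem schedA_eq_app (W16 : List Int) (h : W16.length = 16) :
    make_scheduleA W16 = schedApp W16 48 := by
  have := (sched_inv W16 h 48 le_rfl).2
  simpa [make_scheduleA] using this

theorem schedApp_succ (W16 : List Int) (k : Nat) :
    schedApp W16 (k+1) = schedApp W16 k ++ [PySem.Int.band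
      (pSig1s ((schedApp W16 k).getD (16+k-2) 0) + (schedApp W16 k).getD (16+k-7) 0
        + pSig0s ((schedApp W16 k).getD (16+k-15) 0) + (schedApp W16 k).getD (16+k-16) 0) pMASK] := by
  unfold schedApp
  rw [List.range'_concat, List.foldl_append]
  simp only [List.foldl_cons, List.foldl_nil, Nat.one_mul]

theorem schedApp_prefix (W16 : List Int) : ∀ k k' : Nat, k ≤ k' →
    schedApp W16 k <+: schedApp W16 k' := by
  intro k k' h
  induction k' with
  | zero => rw [Nat.le_zero.mp h]
  | succ k' ih =>
      rcases Nat.lt_or_ge k (k'+1) with hl | hg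
      · exact (ih (by omega)).trans (by rw [schedApp_succ]; exact List.prefix_append _ _)
      · rw [Nat.le_antisymm h hg]

theorem schedA_lt (W16 : List Int) (h : W16.length = 16) {i : Nat} (hi : i < 16) :
    (make_scheduleA W16).getD i 0 = W16.getD i 0 := by
  rw [schedA_eq_app W16 h]
  have hp : schedApp W16 0 <+: schedApp W16 48 := schedApp_prefix W16 0 48 (by omega)
  rw [prefix_getD hp (by simpa [schedApp] using (by omega : i < W16.length)) 0]
  rfl

theorem getD_append_length {α : Type} (P : List α) (v d : α) (rest : List α) :
    (P ++ v :: rest).getD P.length d = v := by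
  induction P with
  | nil => rfl
  | cons x xs ih => simpa using ih

theorem schedApp_two (W16 : List Int) (h : W16.length = 16) :
    schedApp W16 2 = W16 ++
      [PySem.Int.band (pSig1s (W16.getD 14 0) + W16.getD 9 0 + pSig0s (W16.getD 1 0) + W16.getD 0 0) pMASK,
       PySem.Int.band (pSig1s (W16.getD 15 0) + W16.getD 10 0 + pSig0s (W16.getD 2 0) + W16.getD 1 0) pMASK] := by
  rw [schedApp_succ, schedApp_succ]
  have h0 : schedApp W16 0 = W16 := rfl
  rw [h0]
  have g15 : (W16 ++ [PySem.Int.band (pSig1s (W16.getD 14 0) + W16.getD 9 0 + pSig0s (W16.getD 1 0) + W16.getD 0 0) pMASK]).getD 15 0 = W16.getD 15 0 := List.getD_append _ _ _ _ (by omega)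
  have g10 : (W16 ++ [PySem.Int.band (pSig1s (W16.getD 14 0) + W16.getD 9 0 + pSig0s (W16.getD 1 0) + W16.getD 0 0) pMASK]).getD 10 0 = W16.getD 10 0 := List.getD_append _ _ _ _ (by omega)
  have g2 : (W16 ++ [PySem.Int.band (pSig1s (W16.getD 14 0) + W16.getD 9 0 + pSig0s (W16.getD 1 0) + W16.getD 0 0) pMASK]).getD 2 0 = W16.getD 2 0 := List.getD_append _ _ _ _ (by omega)
  have g1 : (W16 ++ [PySem.Int.band (pSig1s (W16.getD 14 0) + W16.getD 9 0 + pSig0s (W16.getD 1 0) + W16.getD 0 0) pMASK]).getD 1 0 = W16.getD 1 0 := List.getD_append _ _ _ _ (by omega)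
  simp only [show (16+0-2) = 14 from rfl, show (16+0-7) = 9 from rfl, show (16+0-15) = 1 from rfl,
    show (16+0-16) = 0 from rfl, show (16+1-2) = 15 from rfl, show (16+1-7) = 10 from rfl,
    show (16+1-15) = 2 from rfl, show (16+1-16) = 1 from rfl, g15, g10, g2, g1]
  simp

theorem getD_pair (P : List Int) (a b : Int) (h : P.length = 16) :
    (P ++ [a, b]).getD 17 0 = b := by
  rw [show P ++ [a, b] = (P ++ [a]) ++ b :: [] from by simp,
      show (17 : Nat) = (P ++ [a]).length from by simp [h], getD_append_length]

theorem schedA_16 (W16 : List Int) (h : W16.length = 16) :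
    (make_scheduleA W16).getD 16 0
      = PySem.Int.band (pSig1s (W16.getD 14 0) + W16.getD 9 0 + pSig0s (W16.getD 1 0) + W16.getD 0 0) pMASK := by
  rw [schedA_eq_app W16 h,
    prefix_getD (schedApp_prefix W16 2 48 (by omega)) (by rw [schedApp_two W16 h]; simp [h]) 0,
    schedApp_two W16 h, show (16 : Nat) = W16.length from h.symm, getD_append_length]

theorem schedA_17 (W16 : List Int) (h : W16.length = 16) :
    (make_scheduleA W16).getD 17 0
      = PySem.Int.band (pSig1s (W16.getD 15 0) + W16.getD 10 0 + pSig0s (W16.getD 2 0) + W16.getD 1 0) pMASK := by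
  rw [schedA_eq_app W16 h,
    prefix_getD (schedApp_prefix W16 2 48 (by omega)) (by rw [schedApp_two W16 h]; simp [h]) 0,
    schedApp_two W16 h]
  exact getD_pair W16 _ _ h

theorem iterSt_schedA (W16 : List Int) (h : W16.length = 16) (n : Nat) (hn : n ≤ 16) :
    iterSt (make_scheduleA W16) n = iterSt W16 n :=
  iterSt_congr _ _ n (fun r hr => schedA_lt W16 h (by omega))

-- normal pass characterization
theorem npass_char (Wn : List Int) : ∀ n : Nat,
    (List.range n).foldl
      (fun (p : PSt × List Int × List Int) r =>
        let s' := sha_stepB p.1 (pK.getD r 0) (Wn.getD r 0)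
        (s', p.2.1 ++ [s'.2.2.2.2.1], p.2.2 ++ [s'.1]))
      (pIVt, [pIVt.2.2.2.2.1], [pIVt.1])
    = (iterSt Wn n, (List.range (n+1)).map (fun r => (iterSt Wn r).2.2.2.2.1),
       (List.range (n+1)).map (fun r => (iterSt Wn r).1))
  | 0 => rfl
  | (n+1) => by
      rw [List.range_succ, List.foldl_append, npass_char Wn n]
      rw [show List.range (n+1+1) = List.range (n+1) ++ [n+1] from List.range_succ]
      simp [iterSt]

theorem e_n_getD (Wn : List Int) {i : Nat} (h : i < 17) :
    (normal_passB Wn).1.getD i 0 = (iterSt Wn i).2.2.2.2.1 := by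
  rw [normal_passB]
  simp only [npass_char Wn 16]
  exact getD_map_range _ _ h

theorem a_n_getD (Wn : List Int) {i : Nat} (h : i < 17) :
    (normal_passB Wn).2.getD i 0 = (iterSt Wn i).1 := by
  rw [normal_passB]
  simp only [npass_char Wn 16]
  exact getD_map_range _ _ h

-- derive pass
def dfold (Wn E : List Int) (DW0 : Int) (n : Nat) : List Int × PSt × List Int :=
  (List.range n).foldl (dstepB Wn E) ([DW0, 0], pIVt, [pIVt.1])

theorem dfold_succ (Wn E : List Int) (DW0 : Int) (n : Nat) :
    dfold Wn E DW0 (n+1) = dstepB Wn E (dfold Wn E DW0 n) n := by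
  unfold dfold
  rw [List.range_succ, List.foldl_append]
  rfl

theorem dlen (Wn E : List Int) (DW0 : Int) : ∀ n : Nat, (dfold Wn E DW0 n).1.length = max n 2
  | 0 => rfl
  | (n+1) => by
      rw [dfold_succ, dstepB]
      by_cases h : 2 ≤ n
      · simp only [if_pos h, List.length_append, dlen Wn E DW0 n, List.length_cons, List.length_nil]
        omega
      · simp only [if_neg h]
        have := dlen Wn E DW0 n
        omega

theorem dprefix (Wn E : List Int) (DW0 : Int) (n : Nat) : ∀ m : Nat, n ≤ m →
    (dfold Wn E DW0 n).1 <+: (dfold Wn E DW0 m).1 := by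
  intro m h
  induction m with
  | zero => rw [Nat.le_zero.mp h]
  | succ m ih =>
      rcases Nat.lt_or_ge n (m+1) with hl | hg
      · refine (ih (by omega)).trans ?_
        rw [dfold_succ, dstepB]
        by_cases h2 : 2 ≤ m
        · simp only [if_pos h2]; exact List.prefix_append _ _
        · simp only [if_neg h2]
          exact List.prefix_rfl
      · rw [Nat.le_antisymm h hg]

def WnL (W0 W1 : Int) : List Int := [W0, W1] ++ List.replicate 14 0
def EnL (W0 W1 : Int) : List Int := (normal_passB (WnL W0 W1)).1
def DfullL (W0 W1 DW0 : Int) : List Int := (dfold (WnL W0 W1) (EnL W0 W1) DW0 16).1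
def CWL (W0 W1 DW0 : Int) : List Int :=
  (List.range 16).map (fun i => PySem.Int.band ((WnL W0 W1).getD i 0 + (DfullL W0 W1 DW0).getD i 0) pMASK)

theorem DfullL_len (W0 W1 DW0 : Int) : (DfullL W0 W1 DW0).length = 16 := by
  rw [DfullL, dlen]; rfl
theorem CWL_len (W0 W1 DW0 : Int) : (CWL W0 W1 DW0).length = 16 := by simp [CWL]

theorem dfold_getD_final (W0 W1 DW0 : Int) {n i : Nat} (hn : n ≤ 16)
    (hi : i < (dfold (WnL W0 W1) (EnL W0 W1) DW0 n).1.length) :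
    (DfullL W0 W1 DW0).getD i 0 = (dfold (WnL W0 W1) (EnL W0 W1) DW0 n).1.getD i 0 :=
  prefix_getD (dprefix _ _ _ n 16 hn) hi 0

theorem dfold_inv (W0 W1 DW0 : Int) : ∀ n : Nat, n ≤ 16 →
    (dfold (WnL W0 W1) (EnL W0 W1) DW0 n).2
    = (iterSt (CWL W0 W1 DW0) n, (List.range (n+1)).map (fun i => (iterSt (CWL W0 W1 DW0) i).1)) := by
  intro n
  induction n with
  | zero => intro _; rfl
  | succ n ih =>
      intro hn
      have ih' := ih (by omega)
      rw [dfold_succ, dstepB]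
      have ht : (dfold (WnL W0 W1) (EnL W0 W1) DW0 n).2.1 = iterSt (CWL W0 W1 DW0) n := by
        rw [ih']
      have hword : ∀ (D' : List Int), D' = (dfold (WnL W0 W1) (EnL W0 W1) DW0 (n+1)).1 →
          PySem.Int.band ((WnL W0 W1).getD n 0 + D'.getD n 0) pMASK = (CWL W0 W1 DW0).getD n 0 := by
        intro D' hD'
        have hlen : n < D'.length := by rw [hD', dlen]; omega
        have : D'.getD n 0 = (DfullL W0 W1 DW0).getD n 0 := by
          rw [hD', ← dfold_getD_final W0 W1 DW0 (by omega : n+1 ≤ 16) (by rw [← hD']; exact hlen)]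
        rw [this, CWL, getD_map_range _ _ (by omega : n < 16)]
      by_cases h2 : 2 ≤ n
      · simp only [if_pos h2]
        have hD' : (dfold (WnL W0 W1) (EnL W0 W1) DW0 (n+1)).1
            = (dfold (WnL W0 W1) (EnL W0 W1) DW0 n).1 ++
              [PySem.Int.band ((EnL W0 W1).getD (n+1) 0
                - (sha_stepB (dfold (WnL W0 W1) (EnL W0 W1) DW0 n).2.1 (pK.getD n 0)
                    (PySem.Int.band ((WnL W0 W1).getD n 0) pMASK)).2.2.2.2.1) pMASK] := by
          rw [dfold_succ, dstepB, if_pos h2]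
        rw [ht]
        rw [show List.range (n+1+1) = List.range (n+1) ++ [n+1] from List.range_succ]
        refine Prod.ext ?_ ?_
        · show sha_stepB (iterSt (CWL W0 W1 DW0) n) (pK.getD n 0) _ = iterSt (CWL W0 W1 DW0) (n+1)
          rw [hword _ (by rw [hD', ht])]
          rfl
        · show (dfold (WnL W0 W1) (EnL W0 W1) DW0 n).2.2 ++ _ = _
          have h22 : (dfold (WnL W0 W1) (EnL W0 W1) DW0 n).2.2
              = (List.range (n+1)).map (fun i => (iterSt (CWL W0 W1 DW0) i).1) := by rw [ih']
          rw [h22, List.map_append]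
          refine congrArg _ ?_
          simp only [List.map_cons, List.map_nil]
          refine congrArg₂ _ ?_ rfl
          show (sha_stepB (iterSt (CWL W0 W1 DW0) n) (pK.getD n 0) _).1 = (iterSt (CWL W0 W1 DW0) (n+1)).1
          rw [hword _ (by rw [hD', ht])]
          rfl
      · simp only [if_neg h2]
        rw [ht]
        rw [show List.range (n+1+1) = List.range (n+1) ++ [n+1] from List.range_succ]
        have hD' : (dfold (WnL W0 W1) (EnL W0 W1) DW0 (n+1)).1
            = (dfold (WnL W0 W1) (EnL W0 W1) DW0 n).1 := by
          rw [dfold_succ, dstepB, if_neg h2]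
        refine Prod.ext ?_ ?_
        · show sha_stepB (iterSt (CWL W0 W1 DW0) n) (pK.getD n 0) _ = iterSt (CWL W0 W1 DW0) (n+1)
          rw [hword _ (by rw [hD'])]
          rfl
        · show (dfold (WnL W0 W1) (EnL W0 W1) DW0 n).2.2 ++ _ = _
          have h22 : (dfold (WnL W0 W1) (EnL W0 W1) DW0 n).2.2
              = (List.range (n+1)).map (fun i => (iterSt (CWL W0 W1 DW0) i).1) := by rw [ih']
          rw [h22, List.map_append]
          refine congrArg _ ?_
          simp only [List.map_cons, List.map_nil]
          refine congrArg₂ _ ?_ rfl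
          show (sha_stepB (iterSt (CWL W0 W1 DW0) n) (pK.getD n 0) _).1 = (iterSt (CWL W0 W1 DW0) (n+1)).1
          rw [hword _ (by rw [hD'])]
          rfl

theorem dfold_two (W0 W1 DW0 : Int) : (dfold (WnL W0 W1) (EnL W0 W1) DW0 2).1 = [DW0, 0] := by
  rw [show (2:Nat) = 1+1 from rfl, dfold_succ, dstepB, if_neg (by omega)]
  rw [show (1:Nat) = 0+1 from rfl, dfold_succ, dstepB, if_neg (by omega)]
  rfl

theorem Dfull_getD0 (W0 W1 DW0 : Int) : (DfullL W0 W1 DW0).getD 0 0 = DW0 := by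
  rw [dfold_getD_final W0 W1 DW0 (by omega : 2 ≤ 16) (by rw [dfold_two]; simp), dfold_two]
  rfl
theorem Dfull_getD1 (W0 W1 DW0 : Int) : (DfullL W0 W1 DW0).getD 1 0 = 0 := by
  rw [dfold_getD_final W0 W1 DW0 (by omega : 2 ≤ 16) (by rw [dfold_two]; simp), dfold_two]
  rfl

theorem getD_append_at (P : List Int) (v : Int) (rest : List Int) {n : Nat} (h : P.length = n) :
    (P ++ v :: rest).getD n 0 = v := by
  subst h; exact getD_append_length P v 0 rest

theorem Dfull_getD_val (W0 W1 DW0 : Int) {n : Nat} (h2 : 2 ≤ n) (h16 : n < 16) :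
    (DfullL W0 W1 DW0).getD n 0
      = PySem.Int.band ((iterSt (WnL W0 W1) (n+1)).2.2.2.2.1
          - (sha_stepB (iterSt (CWL W0 W1 DW0) n) (pK.getD n 0)
              (PySem.Int.band ((WnL W0 W1).getD n 0) pMASK)).2.2.2.2.1) pMASK := by
  have hD' : (dfold (WnL W0 W1) (EnL W0 W1) DW0 (n+1)).1
      = (dfold (WnL W0 W1) (EnL W0 W1) DW0 n).1 ++
        [PySem.Int.band ((EnL W0 W1).getD (n+1) 0
          - (sha_stepB (dfold (WnL W0 W1) (EnL W0 W1) DW0 n).2.1 (pK.getD n 0)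
              (PySem.Int.band ((WnL W0 W1).getD n 0) pMASK)).2.2.2.2.1) pMASK] := by
    rw [dfold_succ, dstepB, if_pos h2]
  have hlen : (dfold (WnL W0 W1) (EnL W0 W1) DW0 n).1.length = n := by rw [dlen]; omega
  have ht : (dfold (WnL W0 W1) (EnL W0 W1) DW0 n).2.1 = iterSt (CWL W0 W1 DW0) n := by
    rw [dfold_inv W0 W1 DW0 n (by omega)]
  have hE : (EnL W0 W1).getD (n+1) 0 = (iterSt (WnL W0 W1) (n+1)).2.2.2.2.1 :=
    e_n_getD (WnL W0 W1) (by omega)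
  rw [dfold_getD_final W0 W1 DW0 (by omega : n+1 ≤ 16) (by rw [hD']; simp [hlen]), hD',
    getD_append_at _ _ _ hlen, ht, hE]

-- A's per-step value equals the online correction
theorem A_val (W0 W1 DW0 : Int) (S : List Int) {wi : Nat} (h2 : 2 ≤ wi) (h16 : wi < 16)
    (hlt : ∀ i, i < wi → S.getD i 0 = (DfullL W0 W1 DW0).getD i 0)
    (hge : ∀ i, wi ≤ i → S.getD i 0 = 0) :
    PySem.Int.band
      (-(((sha_roundsA (make_scheduleA ((List.range 16).map (fun i =>
            PySem.Int.band ((WnL W0 W1).getD i 0 + S.getD i 0) pMASK))) (wi+1)).getD (wi+1) []).getD 4 0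
        - ((sha_roundsA (make_scheduleA (WnL W0 W1)) (wi+1)).getD (wi+1) []).getD 4 0)) pMASK
    = (DfullL W0 W1 DW0).getD wi 0 := by
  set Wfc := (List.range 16).map (fun i => PySem.Int.band ((WnL W0 W1).getD i 0 + S.getD i 0) pMASK) with hWfc
  have hWfcLen : Wfc.length = 16 := by simp [hWfc]
  rw [shaA_getD _ (wi+1) (wi+1) (by omega), shaA_getD _ (wi+1) (wi+1) (by omega), stget4, stget4]
  rw [iterSt_schedA Wfc hWfcLen (wi+1) (by omega), iterSt_schedA (WnL W0 W1) rfl (wi+1) (by omega)]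
  have hpre : iterSt Wfc wi = iterSt (CWL W0 W1 DW0) wi := by
    refine iterSt_congr _ _ wi (fun r hr => ?_)
    rw [hWfc, getD_map_range _ _ (by omega : r < 16), CWL, getD_map_range _ _ (by omega : r < 16),
      hlt r hr]
  have hwd : Wfc.getD wi 0 = PySem.Int.band ((WnL W0 W1).getD wi 0) pMASK := by
    rw [hWfc, getD_map_range _ _ h16, hge wi le_rfl, add_zero]
  rw [show iterSt Wfc (wi+1) = sha_stepB (iterSt Wfc wi) (pK.getD wi 0) (Wfc.getD wi 0) from rfl,
    hpre, hwd, neg_sub]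
  exact (Dfull_getD_val W0 W1 DW0 h2 h16).symm

theorem replicate_getD (c j : Nat) : (List.replicate c (0:Int)).getD j 0 = 0 := by
  rcases Nat.lt_or_ge j c with h | h
  · simp [List.getD_eq_getElem?_getD, List.getElem?_replicate, h]
  · simp [List.getD_eq_getElem?_getD, List.getElem?_replicate, Nat.not_lt.mpr h]

theorem stage_getD_lt (l : List Int) {m i : Nat} (c : Nat) (h : i < m) (hm : m ≤ l.length) :
    (l.take m ++ List.replicate c (0:Int)).getD i 0 = l.getD i 0 := by
  rw [List.getD_append _ _ _ _ (by simp [List.length_take]; omega)]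
  simp [List.getD_eq_getElem?_getD, List.getElem?_take, h]

theorem stage_getD_ge (l : List Int) {m i : Nat} (c : Nat) (h : m ≤ i) (hm : m ≤ l.length) :
    (l.take m ++ List.replicate c (0:Int)).getD i 0 = 0 := by
  rcases Nat.lt_or_ge i (m + c) with hlt | hge
  · rw [List.getD_append_right _ _ _ _ (by simp [List.length_take]; omega)]
    simp [List.length_take, Nat.min_eq_left hm, replicate_getD]
  · rw [List.getD_eq_getElem?_getD, List.getElem?_eq_none (by simp [List.length_take]; omega)]
    rfl

theorem take_succ_getD (l : List Int) {n : Nat} (h : n < l.length) :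
    l.take (n+1) = l.take n ++ [l.getD n 0] := by
  rw [List.take_succ, List.getElem?_eq_getElem h]
  simp [List.getD_eq_getElem?_getD, List.getElem?_eq_getElem h]

theorem set_stage (l : List Int) (m c : Nat) (v : Int) (hm : m < l.length)
    (hv : v = l.getD m 0) :
    (l.take m ++ List.replicate (c+1) (0:Int)).set m v = l.take (m+1) ++ List.replicate c 0 := by
  have h1 := set_append_cons (l.take m) (List.replicate c (0:Int)) 0 v
  have hl : (l.take m).length = m := by simp; omega
  rw [hl] at h1
  rw [List.replicate_succ, h1, hv, take_succ_getD l hm, List.append_assoc]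
  rfl

theorem A_loop (W0 W1 DW0 : Int) : ∀ k : Nat, k ≤ 13 →
    (List.range k).foldl
      (fun DWs step =>
        DWs.set (step + 3)
          (PySem.Int.band
            (-(((sha_roundsA (make_scheduleA ((List.range 16).map (fun i =>
                  PySem.Int.band ((WnL W0 W1).getD i 0 + DWs.getD i 0) pMASK))) (step+4)).getD (step+4) []).getD 4 0
              - ((sha_roundsA (make_scheduleA (WnL W0 W1)) (step+4)).getD (step+4) []).getD 4 0)) pMASK))
      (((List.replicate 16 0).set 0 DW0).set 2
        (PySem.Int.band
          (-(((sha_roundsA (make_scheduleA ((List.range 16).map (fun i =>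
                PySem.Int.band ((WnL W0 W1).getD i 0 + ((List.replicate 16 0).set 0 DW0).getD i 0) pMASK))) 3).getD 3 []).getD 4 0
            - ((sha_roundsA (make_scheduleA (WnL W0 W1)) 3).getD 3 []).getD 4 0)) pMASK))
    = (DfullL W0 W1 DW0).take (k+3) ++ List.replicate (13-k) 0 := by
  have hDlen := DfullL_len W0 W1 DW0
  have hstage0 : ((List.replicate 16 (0:Int)).set 0 DW0)
      = (DfullL W0 W1 DW0).take 2 ++ List.replicate 14 0 := by
    rw [take_succ_getD _ (by omega), take_succ_getD _ (by omega), Dfull_getD0, Dfull_getD1]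
    rfl
  have hbase : (((List.replicate 16 (0:Int)).set 0 DW0).set 2
      (PySem.Int.band
        (-(((sha_roundsA (make_scheduleA ((List.range 16).map (fun i =>
              PySem.Int.band ((WnL W0 W1).getD i 0 + ((List.replicate 16 0).set 0 DW0).getD i 0) pMASK))) 3).getD 3 []).getD 4 0
          - ((sha_roundsA (make_scheduleA (WnL W0 W1)) 3).getD 3 []).getD 4 0)) pMASK))
      = (DfullL W0 W1 DW0).take 3 ++ List.replicate 13 0 := by
    have hv := A_val W0 W1 DW0 ((List.replicate 16 0).set 0 DW0) (by omega : 2 ≤ 2) (by omega)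
      (fun i hi => by
        rw [hstage0, stage_getD_lt _ 14 hi (by omega)])
      (fun i hi => by
        rw [hstage0, stage_getD_ge _ 14 hi (by omega)])
    rw [hv, hstage0]
    rw [show (14:Nat) = 13 + 1 from rfl]
    exact set_stage (DfullL W0 W1 DW0) 2 13 _ (by omega) rfl
  intro k
  induction k with
  | zero => intro _; simpa using hbase
  | succ k ih =>
      intro hk
      rw [show List.range (k+1) = List.range k ++ [k] from List.range_succ,
          List.foldl_append, ih (by omega)]
      simp only [List.foldl_cons, List.foldl_nil]
      have hstage : ∀ i, ((DfullL W0 W1 DW0).take (k+3) ++ List.replicate (13-k) (0:Int)).getD i 0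
          = if i < k+3 then (DfullL W0 W1 DW0).getD i 0 else 0 := by
        intro i
        rcases Nat.lt_or_ge i (k+3) with h | h
        · rw [if_pos h, stage_getD_lt _ _ h (by omega)]
        · rw [if_neg (by omega), stage_getD_ge _ _ h (by omega)]
      have hv := A_val W0 W1 DW0 ((DfullL W0 W1 DW0).take (k+3) ++ List.replicate (13-k) 0)
        (by omega : 2 ≤ k+3) (by omega)
        (fun i hi => by rw [hstage, if_pos hi])
        (fun i hi => by rw [hstage, if_neg (by omega)])
      rw [show k+3+1 = k+4 from rfl] at hv
      rw [hv]
      rw [show (13 - k) = (12 - k) + 1 from by omega]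
      rw [set_stage (DfullL W0 W1 DW0) (k+3) (12-k) _ (by omega) rfl]
      rw [show (12 - k) = 13 - (k+1) from by omega, show k+3+1 = k+1+3 from by omega]

set_option maxHeartbeats 2000000 in
theorem main_eq (W0 W1 DW0 : Int) : compute_f17_f18 W0 W1 DW0 = compute_f17_f18_alt W0 W1 DW0 := by
  have hDlen := DfullL_len W0 W1 DW0
  have hDWs : (List.range 13).foldl
      (fun DWs step =>
        DWs.set (step + 3)
          (PySem.Int.band
            (-(((sha_roundsA (make_scheduleA ((List.range 16).map (fun i =>
                  PySem.Int.band ((WnL W0 W1).getD i 0 + DWs.getD i 0) pMASK))) (step+4)).getD (step+4) []).getD 4 0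
              - ((sha_roundsA (make_scheduleA (WnL W0 W1)) (step+4)).getD (step+4) []).getD 4 0)) pMASK))
      (((List.replicate 16 0).set 0 DW0).set 2
        (PySem.Int.band
          (-(((sha_roundsA (make_scheduleA ((List.range 16).map (fun i =>
                PySem.Int.band ((WnL W0 W1).getD i 0 + ((List.replicate 16 0).set 0 DW0).getD i 0) pMASK))) 3).getD 3 []).getD 4 0
            - ((sha_roundsA (make_scheduleA (WnL W0 W1)) 3).getD 3 []).getD 4 0)) pMASK))
      = DfullL W0 W1 DW0 := by
    rw [A_loop W0 W1 DW0 13 le_rfl]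
    simp [List.take_of_length_le (by omega : (DfullL W0 W1 DW0).length ≤ 16)]
  simp only [compute_f17_f18, compute_f17_f18_alt]
  rw [show ([W0, W1] ++ List.replicate 14 0 : List Int) = WnL W0 W1 from rfl]
  rw [hDWs]
  rw [show (List.range 16).map (fun i =>
        PySem.Int.band ((WnL W0 W1).getD i 0 + (DfullL W0 W1 DW0).getD i 0) pMASK)
      = CWL W0 W1 DW0 from rfl]
  have hCW := CWL_len W0 W1 DW0
  -- a-differences
  rw [shaA_getD _ 15 13 (by omega), shaA_getD _ 15 14 (by omega),
      shaA_getD _ 15 13 (by omega), shaA_getD _ 15 14 (by omega), stget0, stget0, stget0, stget0]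
  rw [iterSt_schedA _ hCW 13 (by omega), iterSt_schedA _ hCW 14 (by omega),
      iterSt_schedA _ rfl 13 (by omega), iterSt_schedA _ rfl 14 (by omega)]
  -- schedule words 16/17
  rw [schedA_16 _ hCW, schedA_17 _ hCW, schedA_16 _ rfl, schedA_17 _ rfl]
  -- B side
  have hder : derive_passB (WnL W0 W1) (normal_passB (WnL W0 W1)).1 DW0
      = ((dfold (WnL W0 W1) (EnL W0 W1) DW0 16).1, (dfold (WnL W0 W1) (EnL W0 W1) DW0 16).2.2) := by
    simp only [derive_passB, dfold, EnL]
  rw [hder]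
  have hinv := dfold_inv W0 W1 DW0 16 le_rfl
  have haf : (dfold (WnL W0 W1) (EnL W0 W1) DW0 16).2.2
      = (List.range 17).map (fun i => (iterSt (CWL W0 W1 DW0) i).1) := by
    rw [hinv]
  rw [haf]
  rw [show (dfold (WnL W0 W1) (EnL W0 W1) DW0 16).1 = DfullL W0 W1 DW0 from by rw [DfullL]]
  rw [show (List.range 16).map (fun i =>
        PySem.Int.band ((WnL W0 W1).getD i 0 + (DfullL W0 W1 DW0).getD i 0) pMASK)
      = CWL W0 W1 DW0 from rfl]
  rw [getD_map_range _ _ (by omega : 13 < 17), getD_map_range _ _ (by omega : 14 < 17)]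
  rw [a_n_getD _ (by omega : 13 < 17), a_n_getD _ (by omega : 14 < 17)]
  simp only [w16w17B]

-- ===== VERDICT (by name: the statement is the Claim_ definition above) =====
set_option maxHeartbeats 1000000 in
theorem compute_f17_f18_spec : Claim_equal_compute_f17_f18 := by
  intro W0 W1 DW0 _
  show compute_f17_f18 W0 W1 DW0 = compute_f17_f18_alt W0 W1 DW0
  exact main_eq W0 W1 DW0
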